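-- pv_equiv track=rewrite | github.com/maxisoft/github-contributions-predictor | 4-inference.py | sanitize_path
-- ===== SOURCE A (Python) =====
-- def sanitize_path(path: str) -> str:
--     stable = False
--     res = path
--     while not stable:
--         tmp = res.replace('..', '_').replace('/', '_')
--         stable = tmp == res
--         res = tmp
--     return res
-- ===== SOURCE B (Python) =====
-- def sanitize_path(path: str) -> str:
--     out = []
--     i = 0
--     n = len(path)
--     while i < n:
--         c = path[i]
--         if c == '.' and i + 1 < n and path[i + 1] == '.':
--             out.append('_')
--             i += 2
--         elif c == '/':
--             out.append('_')
--             i += 1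
--         else:
--             out.append(c)
--             i += 1
--     return ''.join(out)
-- ===== Notes on version B (the rewrite author's own statement) =====
-- stated objective: simpler
-- what changed: A's repeat-until-stable fixed-point loop of two library replace passes ('..'->'_' then '/'->'_') is replaced by one left-to-right index scan that emits '_' for each non-overlapping '..' pair or '/' and copies every other character.
import Mathlib
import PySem

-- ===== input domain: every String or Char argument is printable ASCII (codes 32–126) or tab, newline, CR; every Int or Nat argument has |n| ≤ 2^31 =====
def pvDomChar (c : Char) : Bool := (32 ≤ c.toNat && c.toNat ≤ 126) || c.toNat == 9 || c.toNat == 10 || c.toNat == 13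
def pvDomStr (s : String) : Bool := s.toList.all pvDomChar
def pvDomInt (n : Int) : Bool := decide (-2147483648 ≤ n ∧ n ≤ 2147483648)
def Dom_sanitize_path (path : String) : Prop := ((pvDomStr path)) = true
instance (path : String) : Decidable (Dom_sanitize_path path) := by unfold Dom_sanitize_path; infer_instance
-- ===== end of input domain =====

-- B replaces A's repeat-until-stable loop over two library `replace` passes by a single
-- left-to-right character scan (objective: simpler / one pass).

-- ===== PORT A =====
-- one body of A's while loop: res.replace('..', '_').replace('/', '_')
def pvStepA (res : String) : String :=
  PySem.Str.replace (PySem.Str.replace res ".." "_") "/" "_"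

-- A's `while not stable:` loop. Fuel only makes the recursion total; |path| + 2 always
-- suffices (each unstable iteration shortens the string or removes every '/').
def pvLoopA : Nat → String → String
  | 0, res => res
  | fuel + 1, res =>
      let tmp := pvStepA res
      if tmp = res then tmp else pvLoopA fuel tmp

def sanitize_path (path : String) : String := pvLoopA (path.toList.length + 2) path

-- ===== PORT B =====
-- B's while loop over index i: consume '..' (two chars) or '/' (one char) into '_',
-- otherwise copy the character.
def pvScanB : List Char → List Char
  | [] => []
  | '.' :: '.' :: rest => '_' :: pvScanB rest
  | '/' :: rest => '_' :: pvScanB rest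
  | c :: rest => c :: pvScanB rest

def sanitize_path_alt (path : String) : String := String.ofList (pvScanB path.toList)

-- ===== PRECONDITION & SPEC =====
def Spec_sanitize_path (path : String) (out : String) : Prop := out = sanitize_path_alt path
instance (path : String) (out : String) : Decidable (Spec_sanitize_path path out) := by unfold Spec_sanitize_path; infer_instance

-- ===== CLAIM (what is proved, stated in full; the proofs are below) =====
def Claim_equal_sanitize_path : Prop := ∀ (path : String), Dom_sanitize_path path → Spec_sanitize_path path (sanitize_path path)

-- ===== LEMMAS AND PROOFS =====

-- equations of pvScanB in guarded form
theorem pvScanB_nil : pvScanB [] = [] := rfl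
theorem pvScanB_dotdot (r : List Char) : pvScanB ('.' :: '.' :: r) = '_' :: pvScanB r := rfl
theorem pvScanB_slash (r : List Char) : pvScanB ('/' :: r) = '_' :: pvScanB r := rfl
theorem pvScanB_cons (c : Char) (t : List Char)
    (h1 : ¬ (c = '.' ∧ t.head? = some '.')) (h2 : c ≠ '/') :
    pvScanB (c :: t) = c :: pvScanB t := by
  rw [pvScanB.eq_def]
  split
  · rename_i heq; cases heq
  · rename_i r heq
    injection heq with e1 e2; subst e2
    exact absurd ⟨e1, rfl⟩ h1
  · rename_i r heq
    injection heq with e1 e2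
    exact absurd e1.symm (Ne.symm h2)
  · rename_i c' r heq
    injection heq with e1 e2; subst e1; subst e2; rfl

-- the '..' → '_' pass of A, written as a guarded scan (proof helper)
def pvDot (l : List Char) : List Char :=
  match l with
  | [] => []
  | c :: t =>
    if c = '.' ∧ t.head? = some '.' then '_' :: pvDot t.tail
    else c :: pvDot t
termination_by l.length
decreasing_by
  · simp
  · simp

-- the '/' → '_' pass of A, pointwise
def pvSl (c : Char) : Char := if c = '/' then '_' else c

theorem pvDot_nil : pvDot [] = [] := by rw [pvDot]
theorem pvDot_dotdot (r : List Char) : pvDot ('.' :: '.' :: r) = '_' :: pvDot r := by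
  rw [pvDot]; simp
theorem pvDot_cons (c : Char) (t : List Char) (h : ¬ (c = '.' ∧ t.head? = some '.')) :
    pvDot (c :: t) = c :: pvDot t := by
  rw [pvDot]; simp only [h, if_neg, not_false_eq_true]

theorem pv_go_dot (fuel : Nat) : ∀ (l acc : List Char), l.length ≤ fuel →
    PySem.Chars.replace.go ['.', '.'] ['_'] fuel l acc = acc.reverse ++ pvDot l := by
  induction fuel with
  | zero =>
    intro l acc h
    have : l = [] := List.length_eq_zero_iff.mp (Nat.le_zero.mp h)
    subst this
    simp [PySem.Chars.replace.go, pvDot_nil]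
  | succ n ih =>
    intro l acc h
    cases l with
    | nil => simp [PySem.Chars.replace.go, pvDot_nil]
    | cons c t =>
      by_cases hdot : c = '.' ∧ t.head? = some '.'
      · obtain ⟨rfl, hh⟩ := hdot
        cases t with
        | nil => simp at hh
        | cons c2 r =>
          have : c2 = '.' := by simpa using hh
          subst this
          rw [PySem.Chars.replace.go]
          rw [if_pos (by simp [List.isPrefixOf])]
          have hle : r.length ≤ n := by simp at h; omega
          show PySem.Chars.replace.go ['.', '.'] ['_'] n r (['_'].reverse ++ acc) = acc.reverse ++ pvDot ('.' :: '.' :: r)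
          rw [show (['_'] : List Char).reverse ++ acc = '_' :: acc from rfl]
          rw [ih r ('_' :: acc) hle, pvDot_dotdot]
          simp
      · have hp : (['.', '.'] : List Char).isPrefixOf (c :: t) = false := by
          cases t with
          | nil => simp [List.isPrefixOf]
          | cons c2 r =>
            simp [List.isPrefixOf]
            intro hc hc2
            exact absurd ⟨hc.symm, by simp [hc2.symm]⟩ hdot
        rw [PySem.Chars.replace.go]
        rw [if_neg (by simp [hp])]
        rw [ih t (c :: acc) (by simp at h; omega)]
        rw [pvDot_cons c t hdot]
        simp

theorem pv_go_sl (fuel : Nat) : ∀ (l acc : List Char), l.length ≤ fuel →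
    PySem.Chars.replace.go ['/'] ['_'] fuel l acc = acc.reverse ++ l.map pvSl := by
  induction fuel with
  | zero =>
    intro l acc h
    have : l = [] := List.length_eq_zero_iff.mp (Nat.le_zero.mp h)
    subst this
    simp [PySem.Chars.replace.go]
  | succ n ih =>
    intro l acc h
    cases l with
    | nil => simp [PySem.Chars.replace.go]
    | cons c t =>
      rw [PySem.Chars.replace.go]
      by_cases hc : c = '/'
      · subst hc
        rw [if_pos (by simp [List.isPrefixOf])]
        show PySem.Chars.replace.go ['/'] ['_'] n t (['_'].reverse ++ acc) = acc.reverse ++ List.map pvSl ('/' :: t)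
        rw [show (['_'] : List Char).reverse ++ acc = '_' :: acc from rfl]
        rw [ih t ('_' :: acc) (by simp at h; omega)]
        simp [pvSl]
      · rw [if_neg (by simp [List.isPrefixOf]; exact fun h' => hc h'.symm)]
        rw [ih t (c :: acc) (by simp at h; omega)]
        simp [pvSl, hc]

theorem pv_replace_dot (l : List Char) :
    PySem.Chars.replace l ['.', '.'] ['_'] = pvDot l := by
  rw [PySem.Chars.replace]
  rw [if_neg (by simp)]
  exact pv_go_dot l.length l [] (le_refl _)

theorem pv_replace_sl (l : List Char) :
    PySem.Chars.replace l ['/'] ['_'] = l.map pvSl := by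
  rw [PySem.Chars.replace]
  rw [if_neg (by simp)]
  exact pv_go_sl l.length l [] (le_refl _)

-- A's two passes compose to B's single scan
theorem pv_scan_eq (fuel : Nat) : ∀ (l : List Char), l.length ≤ fuel →
    (pvDot l).map pvSl = pvScanB l := by
  induction fuel with
  | zero =>
    intro l h
    have : l = [] := List.length_eq_zero_iff.mp (Nat.le_zero.mp h)
    subst this; simp [pvDot_nil, pvScanB_nil]
  | succ n ih =>
    intro l h
    cases l with
    | nil => simp [pvDot_nil, pvScanB_nil]
    | cons c t =>
      by_cases hdot : c = '.' ∧ t.head? = some '.'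
      · obtain ⟨rfl, hh⟩ := hdot
        cases t with
        | nil => simp at hh
        | cons c2 r =>
          have : c2 = '.' := by simpa using hh
          subst this
          rw [pvDot_dotdot, pvScanB_dotdot]
          simp only [List.map_cons]
          rw [ih r (by simp at h; omega)]
          rfl
      · rw [pvDot_cons c t hdot]
        by_cases hc : c = '/'
        · subst hc
          rw [pvScanB_slash]
          simp only [List.map_cons]
          rw [ih t (by simp at h; omega)]
          rfl
        · rw [pvScanB_cons c t hdot hc]
          simp only [List.map_cons]
          rw [ih t (by simp at h; omega)]
          simp [pvSl, hc]

theorem pvStepA_eq (s : String) : pvStepA s = String.ofList (pvScanB s.toList) := by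
  unfold pvStepA
  rw [PySem.Str.replace, PySem.Str.replace]
  rw [show (".." : String).toList = ['.', '.'] from rfl,
      show ("/" : String).toList = ['/'] from rfl,
      show ("_" : String).toList = ['_'] from rfl]
  rw [pv_replace_dot, String.toList_ofList, pv_replace_sl]
  rw [pv_scan_eq (s.toList.length) s.toList (le_refl _)]


-- the scan's output never starts with '.' unless the input did
theorem pvScanB_head (t : List Char) (h : t.head? ≠ some '.') :
    (pvScanB t).head? ≠ some '.' := by
  cases t with
  | nil => simp [pvScanB_nil]
  | cons c2 r =>
    have hc2 : c2 ≠ '.' := by simpa using h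
    by_cases hsl : c2 = '/'
    · subst hsl; rw [pvScanB_slash]; simp
    · rw [pvScanB_cons c2 r (by simp [hc2]) hsl]
      simpa using hc2

-- the scan is idempotent: its output contains no '/' and no '..'
theorem pv_scan_scan (fuel : Nat) : ∀ (l : List Char), l.length ≤ fuel →
    pvScanB (pvScanB l) = pvScanB l := by
  induction fuel with
  | zero =>
    intro l h
    have : l = [] := List.length_eq_zero_iff.mp (Nat.le_zero.mp h)
    subst this; simp [pvScanB_nil]
  | succ n ih =>
    intro l h
    cases l with
    | nil => simp [pvScanB_nil]
    | cons c t =>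
      by_cases hdot : c = '.' ∧ t.head? = some '.'
      · obtain ⟨rfl, hh⟩ := hdot
        cases t with
        | nil => simp at hh
        | cons c2 r =>
          have : c2 = '.' := by simpa using hh
          subst this
          rw [pvScanB_dotdot]
          have hr : r.length ≤ n := by simp at h; omega
          rw [pvScanB_cons '_' (pvScanB r) (by simp) (by decide)]
          rw [ih r hr]
      · by_cases hc : c = '/'
        · subst hc
          rw [pvScanB_slash]
          have ht : t.length ≤ n := by simp at h; omega
          rw [pvScanB_cons '_' (pvScanB t) (by simp) (by decide)]
          rw [ih t ht]
        · rw [pvScanB_cons c t hdot hc]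
          have ht : t.length ≤ n := by simp at h; omega
          have hhead : ¬ (c = '.' ∧ (pvScanB t).head? = some '.') := by
            rintro ⟨rfl, hh⟩
            exact pvScanB_head t (fun h' => hdot ⟨rfl, h'⟩) hh
          rw [pvScanB_cons c (pvScanB t) hhead hc]
          rw [ih t ht]

-- ===== VERDICT (by name: the statement is the Claim_ definition above) =====
theorem sanitize_path_spec : Claim_equal_sanitize_path := by
  intro path _
  unfold Spec_sanitize_path sanitize_path sanitize_path_alt
  rw [pvLoopA]
  by_cases h : pvStepA path = path
  · simp only [h, if_pos]
    rw [← pvStepA_eq, h]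
  · simp only [h, if_neg, not_false_eq_true]
    rw [pvLoopA]
    have h2 : pvStepA (pvStepA path) = pvStepA path := by
      rw [pvStepA_eq path, pvStepA_eq (String.ofList (pvScanB path.toList))]
      rw [String.toList_ofList]
      rw [pv_scan_scan path.toList.length path.toList (le_refl _)]
    simp only [h2, if_pos]
    exact pvStepA_eq path
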